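-- pv_equiv track=rewrite | github.com/letai2001/python | python/Baitap9.xulichuoi.py | xoaKiTu
-- ===== SOURCE A (Python) =====
-- def xoaKiTu(str1,str2):
--     list = []
--     for i in range (len(str1)):
--          if str1[i] in str2:
--              i+=1
--          else:
--               list.append(str1[i])
--     newstring = ''.join(list)
--     return newstring
-- ===== SOURCE B (Python) =====
-- def xoaKiTu(str1, str2):
--     for ch in str2:
--         str1 = str1.replace(ch, '')
--     return str1
-- ===== Notes on version B (the rewrite author's own statement) =====
-- stated objective: alternative
-- what changed: Instead of A's single index loop over str1 with a per-character 'in str2' test and a list accumulator, B loops over str2 and performs one str.replace pass per character of str2, rewriting str1 in stages.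
import Mathlib
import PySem

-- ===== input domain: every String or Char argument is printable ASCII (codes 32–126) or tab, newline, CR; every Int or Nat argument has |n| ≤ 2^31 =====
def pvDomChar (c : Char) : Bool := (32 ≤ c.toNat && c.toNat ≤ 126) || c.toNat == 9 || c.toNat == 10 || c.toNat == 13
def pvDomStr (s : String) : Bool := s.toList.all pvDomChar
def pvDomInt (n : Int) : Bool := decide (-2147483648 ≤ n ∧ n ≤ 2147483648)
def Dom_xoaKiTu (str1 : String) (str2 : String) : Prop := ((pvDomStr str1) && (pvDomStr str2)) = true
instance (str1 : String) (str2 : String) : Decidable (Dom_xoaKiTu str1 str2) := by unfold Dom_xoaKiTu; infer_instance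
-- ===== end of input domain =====

-- B loops over str2 and removes each of its characters from str1 by one str.replace(ch, '')
-- pass per character (staged rewriting of str1), instead of A's single index loop over str1
-- with a per-character 'in str2' test and a list accumulator; return values proved equal on Dom.

-- ===== PORT A =====
-- index loop 'for i in range(len(str1)):', membership test 'str1[i] in str2'
-- (a one-character substring test), list accumulator, final ''.join(list).
def xoaKiTu (str1 : String) (str2 : String) : String :=
  let lst : List String :=
    (PySem.List.pyRange 0 (PySem.Str.len str1) 1).foldl
      (fun acc i =>
        if PySem.Str.isIn (String.ofList [PySem.List.pyGetD str1.toList i ' ']) str2 then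
          acc
        else
          acc ++ [String.ofList [PySem.List.pyGetD str1.toList i ' ']]) []
  PySem.Str.join "" lst

-- ===== PORT B =====
-- 'for ch in str2: str1 = str1.replace(ch, "")' then 'return str1'
def xoaKiTu_alt (str1 : String) (str2 : String) : String :=
  str2.toList.foldl (fun s ch => PySem.Str.replace s (String.ofList [ch]) "") str1

-- ===== PRECONDITION & SPEC =====
def Spec_xoaKiTu (str1 : String) (str2 : String) (out : String) : Prop := out = xoaKiTu_alt str1 str2
instance (str1 : String) (str2 : String) (out : String) : Decidable (Spec_xoaKiTu str1 str2 out) := by unfold Spec_xoaKiTu; infer_instance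

-- ===== CLAIM (what is proved, stated in full; the proofs are below) =====
def Claim_equal_xoaKiTu : Prop := ∀ (str1 : String) (str2 : String), Dom_xoaKiTu str1 str2 → Spec_xoaKiTu str1 str2 (xoaKiTu str1 str2)

-- ===== LEMMAS AND PROOFS =====

-- a one-character string is a substring iff the character occurs
theorem pv_isIn_singleton (c : Char) (s : String) :
    PySem.Str.isIn (String.ofList [c]) s = decide (c ∈ s.toList) := by
  by_cases hc : c ∈ s.toList
  · rcases List.mem_iff_append.mp hc with ⟨p, t, hpt⟩
    have h1 : PySem.Str.isIn (String.ofList [c]) s = true :=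
      (PySem.Str.isIn_iff_infix _ _).mpr ⟨p, t, by simp [String.toList_ofList, hpt]⟩
    rw [h1]; simp [hc]
  · rcases h : PySem.Str.isIn (String.ofList [c]) s with _ | _
    · simp [hc]
    · rcases (PySem.Str.isIn_iff_infix _ _).mp h with ⟨p, t, hpt⟩
      exact absurd (by rw [← hpt]; simp [String.toList_ofList] : c ∈ s.toList) hc

-- A's branch order ('if in: skip else: append') flipped to the append-first form
theorem pv_branch_swap (q : Char → Bool) (g : Char → String) (l : List Char) (acc : List String) :
    l.foldl (fun acc c => if q c then acc else acc ++ [g c]) acc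
      = l.foldl (fun acc c => if !q c then acc ++ [g c] else acc) acc := by
  apply PySem.List.foldl_congr_mem
  intro acc c _
  cases h : q c <;> simp

-- replace's worker with a single-char pattern and empty replacement is a filter
theorem pv_replace_go_single (c : Char) :
    ∀ (fuel : Nat) (l acc : List Char), l.length ≤ fuel →
      PySem.Chars.replace.go [c] [] fuel l acc = acc.reverse ++ l.filter (· ≠ c) := by
  intro fuel
  induction fuel with
  | zero =>
    intro l acc h
    have : l = [] := List.eq_nil_of_length_eq_zero (Nat.le_zero.mp h)
    subst this
    simp [PySem.Chars.replace.go]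
  | succ n ih =>
    intro l acc h
    cases l with
    | nil => simp [PySem.Chars.replace.go]
    | cons d t =>
      rw [PySem.Chars.replace.go]
      by_cases hd : d = c
      · subst hd
        rw [if_pos (by simp [List.isPrefixOf])]
        have ht : List.drop [d].length (d :: t) = t := by simp
        rw [ht, ih t ([].reverse ++ acc) (by simpa using Nat.le_of_succ_le_succ h)]
        simp
      · rw [if_neg (by
          simp only [List.isPrefixOf, Bool.and_true, beq_iff_eq]
          exact fun hh => hd hh.symm)]
        rw [ih t (d :: acc) (by simpa using Nat.le_of_succ_le_succ h)]
        simp [hd]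

-- one str.replace(ch, '') pass deletes exactly that character
theorem pv_replace_single (c : Char) (cs : List Char) :
    PySem.Chars.replace cs [c] [] = cs.filter (· ≠ c) := by
  rw [PySem.Chars.replace]
  have hne : ¬ (([c] : List Char).isEmpty = true) := by simp
  rw [if_neg hne]
  exact pv_replace_go_single c cs.length cs [] (le_refl _)

-- the staged replace passes compose to one filter by the combined membership test
theorem pv_fold_replace (l : List Char) :
    ∀ cs : List Char,
      (l.foldl (fun s ch => PySem.Str.replace s (String.ofList [ch]) "") (String.ofList cs)).toList
        = cs.filter (fun c => !decide (c ∈ l)) := by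
  induction l with
  | nil => intro cs; simp [String.toList_ofList]
  | cons d t ih =>
    intro cs
    have hstep : PySem.Str.replace (String.ofList cs) (String.ofList [d]) ""
        = String.ofList (cs.filter (· ≠ d)) := by
      apply String.ext
      rw [PySem.Str.toList_replace]
      simp only [String.toList_ofList]
      exact pv_replace_single d cs
    simp only [List.foldl_cons, hstep, ih (cs.filter (· ≠ d)), List.filter_filter]
    apply List.filter_congr
    intro c _
    by_cases h1 : c = d <;> by_cases h2 : c ∈ t <;> simp [h1, h2]

-- ===== VERDICT (by name: the statement is the Claim_ definition above) =====
theorem xoaKiTu_spec : Claim_equal_xoaKiTu := by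
  unfold Claim_equal_xoaKiTu
  intro str1 str2 _
  unfold Spec_xoaKiTu xoaKiTu xoaKiTu_alt
  simp only
  rw [PySem.Str.len_eq,
    PySem.List.foldl_pyRange_zero_pyGetD' str1.toList ' '
      (fun acc c => if PySem.Str.isIn (String.ofList [c]) str2 then acc else acc ++ [String.ofList [c]]) [],
    pv_branch_swap,
    PySem.List.foldl_append_if (fun c => !PySem.Str.isIn (String.ofList [c]) str2) (fun c => String.ofList [c])]
  apply String.ext
  have hb : str2.toList.foldl (fun s ch => PySem.Str.replace s (String.ofList [ch]) "") str1
      = str2.toList.foldl (fun s ch => PySem.Str.replace s (String.ofList [ch]) "") (String.ofList str1.toList) := by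
    rw [String.ofList_toList]
  rw [hb, pv_fold_replace str2.toList str1.toList]
  rw [PySem.Str.toList_join, List.nil_append, List.map_map]
  have h2 : (String.toList ∘ fun c => String.ofList [c]) = (fun c => [c]) := by
    funext c; simp [String.toList_ofList]
  have h3 : ("" : String).toList = ([] : List Char) := rfl
  rw [h2, h3]
  rw [PySem.Chars.join_nil_singletons]
  apply List.filter_congr
  intro c _
  rw [pv_isIn_singleton]
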